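-- pv_equiv track=rewrite | github.com/OIM3640/Text-Analysis-Project | text_processing.py | clean_and_filter
-- ===== SOURCE A (Python) =====
-- def clean_and_filter(text: str) -> str:
--     """Lowercase, keep only letters, and remove stopwords/pronouns."""
--     Filter_Words = {# --- Stopwords ---
--     'the','and','a','to','of','in','is','it','for','on','was','as','at',
--     'with','be','by','an','are','were','from','this','which',
--
--     # --- Pronouns ---
--     'i','you','he','she','it','we','they','me','him','her','us','them',
--     'my','your','his','its','our','their','mine','yours','hers','ours','theirs',
--     'myself','yourself','himself','herself','itself','ourselves','yourselves','themselves',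
--     'this','that','these','those',
--     'who','whom','whose','which','what',
--     'all','another','any','anybody','anyone','anything','both','each','either',
--     'everybody','everyone','everything','few','many','most','neither','nobody',
--     'none','no','one','no one','other','others','several','some','somebody',
--     'someone','something','such'}
--     text = text.lower()
--     cleaned = ""
--     filtered= []
--     for i in text:
--         if i.isalpha() or i.isspace():
--             cleaned += i
--     words = cleaned.split()
--     for i in words:
--         if i not in Filter_Words:
--             filtered.append(i)
--     return " ".join(filtered)
-- ===== SOURCE B (Python) =====
-- FILTER_WORDS = set(
--     "the and a to of in is it for on was as at with be by an are were from "
--     "this which i you he she it we they me him her us them my your his its "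
--     "our their mine yours hers ours theirs myself yourself himself herself "
--     "itself ourselves yourselves themselves this that these those who whom "
--     "whose which what all another any anybody anyone anything both each "
--     "either everybody everyone everything few many most neither nobody none "
--     "no one other others several some somebody someone something such".split()
-- )
--
--
-- def clean_and_filter(text: str) -> str:
--     """Lowercase, keep only letters, and remove stopwords/pronouns."""
--     kept = []
--     for token in text.lower().split():
--         word = "".join(c for c in token if c.isalpha())
--         if word and word not in FILTER_WORDS:
--             kept.append(word)
--     return " ".join(kept)
-- ===== Notes on version B (the rewrite author's own statement) =====
-- stated objective: simpler
-- what changed: B tokenizes the lowercased text on whitespace first and then, in a single loop over tokens, deletes non-letter characters inside each token and drops empty or stopword tokens, instead of A's separate character-stream cleaning pass followed by a second word-filtering pass.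
import Mathlib
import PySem

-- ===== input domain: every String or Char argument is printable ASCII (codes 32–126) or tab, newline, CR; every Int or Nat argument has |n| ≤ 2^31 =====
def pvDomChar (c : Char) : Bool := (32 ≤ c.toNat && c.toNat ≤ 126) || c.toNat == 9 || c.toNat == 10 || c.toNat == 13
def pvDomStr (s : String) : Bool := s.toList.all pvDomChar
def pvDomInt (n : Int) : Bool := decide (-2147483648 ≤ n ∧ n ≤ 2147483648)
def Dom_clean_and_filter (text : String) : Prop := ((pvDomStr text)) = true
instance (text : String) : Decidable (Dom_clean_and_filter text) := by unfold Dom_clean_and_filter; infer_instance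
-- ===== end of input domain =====

-- B tokenizes first and cleans each token (one pass over the words) instead of A's
-- char-stream clean pass followed by a separate word-filter pass; objective: simpler decomposition.

-- ===== PORT A =====
-- the set literal Filter_Words from A, in source order (PySem.Set dedups like a Python set)
def pvFilterWordsA : PySem.Set (List Char) :=
  PySem.Set.ofList ["the".toList, "and".toList, "a".toList, "to".toList, "of".toList, "in".toList, "is".toList, "it".toList, "for".toList, "on".toList, "was".toList, "as".toList, "at".toList, "with".toList, "be".toList, "by".toList, "an".toList, "are".toList, "were".toList, "from".toList, "this".toList, "which".toList, "i".toList, "you".toList, "he".toList, "she".toList, "it".toList, "we".toList, "they".toList, "me".toList, "him".toList, "her".toList, "us".toList, "them".toList, "my".toList, "your".toList, "his".toList, "its".toList, "our".toList, "their".toList, "mine".toList, "yours".toList, "hers".toList, "ours".toList, "theirs".toList, "myself".toList, "yourself".toList, "himself".toList, "herself".toList, "itself".toList, "ourselves".toList, "yourselves".toList, "themselves".toList, "this".toList, "that".toList, "these".toList, "those".toList, "who".toList, "whom".toList, "whose".toList, "which".toList, "what".toList, "all".toList, "another".toList, "any".toList, "anybody".toList, "anyone".toList, "anything".toList, "both".toList,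 "each".toList, "either".toList, "everybody".toList, "everyone".toList, "everything".toList, "few".toList, "many".toList, "most".toList, "neither".toList, "nobody".toList, "none".toList, "no".toList, "one".toList, "no one".toList, "other".toList, "others".toList, "several".toList, "some".toList, "somebody".toList, "someone".toList, "something".toList, "such".toList]

def clean_and_filter (text : String) : String :=
  let t := PySem.Chars.lower text.toList
  let cleaned := t.foldl (fun acc c => if PySem.Chars.isalpha c || PySem.Chars.isspace c then acc ++ [c] else acc) []
  let words := PySem.Chars.split₀ cleaned
  let filtered := words.foldl (fun acc w => if !pvFilterWordsA.contains w then acc ++ [w] else acc) []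
  String.mk (PySem.Chars.join " ".toList filtered)

-- ===== PORT B =====
-- B's module constant: FILTER_WORDS = set("… …".split())
def pvStopStrB : String := "the and a to of in is it for on was as at with be by an are were from this which i you he she it we they me him her us them my your his its our their mine yours hers ours theirs myself yourself himself herself itself ourselves yourselves themselves this that these those who whom whose which what all another any anybody anyone anything both each either everybody everyone everything few many most neither nobody none no one other others several some somebody someone something such"

def pvFilterWordsB : PySem.Set (List Char) :=
  PySem.Set.ofList (PySem.Chars.split₀ pvStopStrB.toList)

def clean_and_filter_alt (text : String) : String :=
  let kept := (PySem.Chars.split₀ (PySem.Chars.lower text.toList)).foldl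
    (fun acc token =>
      let word := token.filter PySem.Chars.isalpha
      if !word.isEmpty && !pvFilterWordsB.contains word then acc ++ [word] else acc) []
  String.mk (PySem.Chars.join " ".toList kept)

-- ===== PRECONDITION & SPEC =====
def Spec_clean_and_filter (text : String) (out : String) : Prop := out = clean_and_filter_alt text
instance (text : String) (out : String) : Decidable (Spec_clean_and_filter text out) := by unfold Spec_clean_and_filter; infer_instance

-- ===== CLAIM (what is proved, stated in full; the proofs are below) =====
def Claim_equal_clean_and_filter : Prop := ∀ (text : String), Dom_clean_and_filter text → Spec_clean_and_filter text (clean_and_filter text)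

-- ===== LEMMAS AND PROOFS =====

-- A's word list = (B's word list with "no one" inserted); both sides are closed literals
def pvL1 : List (List Char) := ["the".toList, "and".toList, "a".toList, "to".toList, "of".toList, "in".toList, "is".toList, "it".toList, "for".toList, "on".toList, "was".toList, "as".toList, "at".toList, "with".toList, "be".toList, "by".toList, "an".toList, "are".toList, "were".toList, "from".toList, "this".toList, "which".toList, "i".toList, "you".toList, "he".toList, "she".toList, "it".toList, "we".toList, "they".toList, "me".toList, "him".toList, "her".toList, "us".toList, "them".toList, "my".toList, "your".toList, "his".toList, "its".toList, "our".toList, "their".toList, "mine".toList, "yours".toList, "hers".toList, "ours".toList, "theirs".toList, "myself".toList, "yourself".toList, "himself".toList, "herself".toList, "itself".toList, "ourselves".toList, "yourselves".toList, "themselves".toList, "this".toList, "that".toList, "these".toList, "those".toList, "who".toList, "whom".toList, "whose".toList, "which".toList, "what".toList, "all".toList, "another".toList, "any".toList, "anybody".toList, "anyone".toList, "anything".toList, "both".toList, "each".toList, "either".toList, "everybody".toList, "everyone".toList, "everything".toList, "few".toList, "many".toList, "most".toList, "neither".toList, "nobody".toList, "none".toList, "no".toList, "one".toList]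
def pvL2 : List (List Char) := ["other".toList, "others".toList, "several".toList, "some".toList, "somebody".toList, "someone".toList, "something".toList, "such".toList]

set_option maxRecDepth 8192 in
set_option maxHeartbeats 1000000 in
theorem pvListA_eq : (["the".toList, "and".toList, "a".toList, "to".toList, "of".toList, "in".toList, "is".toList, "it".toList, "for".toList, "on".toList, "was".toList, "as".toList, "at".toList, "with".toList, "be".toList, "by".toList, "an".toList, "are".toList, "were".toList, "from".toList, "this".toList, "which".toList, "i".toList, "you".toList, "he".toList, "she".toList, "it".toList, "we".toList, "they".toList, "me".toList, "him".toList, "her".toList, "us".toList, "them".toList, "my".toList, "your".toList, "his".toList, "its".toList, "our".toList, "their".toList, "mine".toList, "yours".toList, "hers".toList, "ours".toList, "theirs".toList, "myself".toList, "yourself".toList, "himself".toList, "herself".toList, "itself".toList, "ourselves".toList, "yourselves".toList, "themselves".toList, "this".toList, "that".toList, "these".toList, "those".toList, "who".toList, "whom".toList, "whose".toList, "which".toList, "what".toList, "all".toList, "another".toList, "any".toList, "anybody".toList, "anyone".toList, "anything".toList, "both".toList, "each".toList, "either".toList, "everybody".toList, "everyone".toList, "everything".toList, "few".toList, "many".toList,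 "most".toList, "neither".toList, "nobody".toList, "none".toList, "no".toList, "one".toList, "no one".toList, "other".toList, "others".toList, "several".toList, "some".toList, "somebody".toList, "someone".toList, "something".toList, "such".toList] : List (List Char)) = pvL1 ++ ["no one".toList] ++ pvL2 := by rfl

set_option maxRecDepth 8192 in
set_option maxHeartbeats 1000000 in
theorem pvSplitB_eq : PySem.Chars.split₀ pvStopStrB.toList = pvL1 ++ pvL2 := by rfl

-- membership in the two stopword sets agrees on all-letter words ("no one" contains a space)
theorem pvContains_eq (w : List Char) (hw : ∀ c ∈ w, PySem.Chars.isalpha c = true) :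
    pvFilterWordsA.contains w = pvFilterWordsB.contains w := by
  have hne : w ≠ "no one".toList := by
    intro h
    have := hw ' ' (by rw [h]; decide)
    exact absurd this (by decide)
  have hiff : w ∈ pvFilterWordsA ↔ w ∈ pvFilterWordsB := by
    unfold pvFilterWordsA pvFilterWordsB
    rw [PySem.Set.mem_ofList, PySem.Set.mem_ofList, pvListA_eq, pvSplitB_eq]
    simp only [List.mem_append, List.mem_singleton]
    tauto
  unfold PySem.Set.contains
  rw [List.contains_eq_mem, List.contains_eq_mem]
  exact decide_eq_decide.mpr hiff

-- core: deleting the non-letter, non-space chars first and then splitting equals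
-- splitting first, deleting non-letters inside each token, and dropping emptied tokens
theorem pvGo_filter (s cur : List Char) (acc : List (List Char)) :
    PySem.Chars.split₀.go (s.filter (fun c => PySem.Chars.isalpha c || PySem.Chars.isspace c))
      (cur.filter PySem.Chars.isalpha)
      ((acc.map (fun w => w.filter PySem.Chars.isalpha)).filter (fun w => !w.isEmpty))
    = ((PySem.Chars.split₀.go s cur acc).map (fun w => w.filter PySem.Chars.isalpha)).filter (fun w => !w.isEmpty) := by
  induction s generalizing cur acc with
  | nil =>
    simp only [List.filter_nil, PySem.Chars.split₀.go]
    by_cases hq : cur.filter PySem.Chars.isalpha = []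
    · rw [if_pos (by simp [hq])]
      by_cases h : cur = []
      · rw [if_pos (by simp [h])]
        simp [List.map_reverse, List.filter_reverse]
      · rw [if_neg (by simp [h])]
        simp [List.map_reverse, List.filter_reverse, hq]
    · rw [if_neg (by simp [hq])]
      have h : cur ≠ [] := by rintro rfl; simp at hq
      rw [if_neg (by simp [h])]
      simp [List.map_reverse, List.filter_reverse, hq]
  | cons c rest ih =>
    by_cases hsp : PySem.Chars.isspace c = true
    · rw [List.filter_cons_of_pos (by simp [hsp])]
      simp only [PySem.Chars.split₀.go, hsp, if_true]
      by_cases hq : cur.filter PySem.Chars.isalpha = []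
      · rw [if_pos (by simp [hq])]
        by_cases h : cur = []
        · rw [if_pos (by simp [h])]
          have := ih [] acc
          simpa using this
        · rw [if_neg (by simp [h])]
          have := ih [] (cur.reverse :: acc)
          simp only [List.filter_nil] at this ⊢
          rw [← this]
          congr 1
          simp [List.filter_reverse, hq]
      · rw [if_neg (by simp [hq])]
        have h : cur ≠ [] := by rintro rfl; simp at hq
        rw [if_neg (by simp [h])]
        have := ih [] (cur.reverse :: acc)
        simp only [List.filter_nil] at this ⊢
        rw [← this]
        congr 1
        simp [List.filter_reverse, hq]
    · by_cases hal : PySem.Chars.isalpha c = true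
      · rw [List.filter_cons_of_pos (by simp [hal])]
        simp only [PySem.Chars.split₀.go, hsp, if_false, Bool.false_eq_true]
        rw [show c :: cur.filter PySem.Chars.isalpha = (c :: cur).filter PySem.Chars.isalpha from
          (List.filter_cons_of_pos hal).symm]
        exact ih (c :: cur) acc
      · rw [List.filter_cons_of_neg (by simp [hal, hsp])]
        simp only [PySem.Chars.split₀.go, hsp, if_false, Bool.false_eq_true]
        rw [show cur.filter PySem.Chars.isalpha = (c :: cur).filter PySem.Chars.isalpha from
          (List.filter_cons_of_neg (by simp [hal])).symm]
        exact ih (c :: cur) acc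

theorem pvSplit_filter (s : List Char) :
    PySem.Chars.split₀ (s.filter (fun c => PySem.Chars.isalpha c || PySem.Chars.isspace c))
    = ((PySem.Chars.split₀ s).map (fun w => w.filter PySem.Chars.isalpha)).filter (fun w => !w.isEmpty) := by
  simpa [PySem.Chars.split₀] using pvGo_filter s [] []

-- ===== VERDICT (by name: the statement is the Claim_ definition above) =====
theorem clean_and_filter_spec : Claim_equal_clean_and_filter := by
  intro text _
  unfold Spec_clean_and_filter clean_and_filter clean_and_filter_alt
  have hA1 := PySem.List.foldl_append_if
    (fun c => PySem.Chars.isalpha c || PySem.Chars.isspace c) (fun c => c)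
    (PySem.Chars.lower text.toList) []
  have hA2 := PySem.List.foldl_append_if (fun w => !pvFilterWordsA.contains w)
    (fun w => w)
    (PySem.Chars.split₀ ((PySem.Chars.lower text.toList).filter
      (fun c => PySem.Chars.isalpha c || PySem.Chars.isspace c))) []
  have hB := PySem.List.foldl_append_if
    (fun t => !(t.filter PySem.Chars.isalpha).isEmpty &&
              !pvFilterWordsB.contains (t.filter PySem.Chars.isalpha))
    (fun t => t.filter PySem.Chars.isalpha)
    (PySem.Chars.split₀ (PySem.Chars.lower text.toList)) []
  simp only [List.nil_append, List.map_id'] at hA1 hA2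
  simp only [List.nil_append] at hB
  simp only []
  rw [hA1, hA2, hB, pvSplit_filter, List.filter_filter, List.filter_map]
  have hfilt : ((PySem.Chars.split₀ (PySem.Chars.lower text.toList)).filter
        ((fun w => (!pvFilterWordsA.contains w && !w.isEmpty)) ∘
          (fun w => w.filter PySem.Chars.isalpha)))
      = ((PySem.Chars.split₀ (PySem.Chars.lower text.toList)).filter
        (fun t => (!(t.filter PySem.Chars.isalpha).isEmpty &&
          !pvFilterWordsB.contains (t.filter PySem.Chars.isalpha)))) := by
    apply List.filter_congr
    intro t _
    have hall : ∀ c ∈ t.filter PySem.Chars.isalpha, PySem.Chars.isalpha c = true := by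
      intro c hc
      exact (List.mem_filter.mp hc).2
    simp only [Function.comp_apply]
    rw [pvContains_eq _ hall]
    exact Bool.and_comm _ _
  rw [hfilt]
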